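-- pv_equiv track=rewrite | github.com/enzogirardi84/medicare-pro-v2 | core/_exports_helpers.py | record_matches_patient
-- ===== SOURCE A (Python) =====
-- def split_patient_visual_id(paciente_sel):
--     texto = str(paciente_sel or "").strip()
--     if " - " not in texto:
--         return texto, ""
--     nombre, dni = texto.rsplit(" - ", 1)
--     return nombre.strip(), dni.strip()
--
-- def normalize_patient_name(nombre):
--     return " ".join(str(nombre or "").strip().lower().split())
--
-- def record_matches_patient(record, paciente_sel, ctx):
--     if not isinstance(record, dict):
--         return False
--     candidatos = []
--     for clave in ("paciente", "paciente_id", "dni"):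
--         valor = record.get(clave)
--         if valor not in (None, ""):
--             candidatos.append(str(valor).strip())
--     if paciente_sel and any(valor == paciente_sel for valor in candidatos):
--         return True
--     dni_ref = str(ctx.get("dni") or "").strip()
--     if dni_ref:
--         for valor in candidatos:
--             _, dni_valor = split_patient_visual_id(valor)
--             if dni_valor and dni_valor == dni_ref:
--                 return True
--             if valor == dni_ref:
--                 return True
--     nombre_ref = normalize_patient_name(ctx.get("nombre"))
--     if not nombre_ref:
--         return False
--     for valor in candidatos:
--         nombre_valor, dni_valor = split_patient_visual_id(valor)
--         if dni_ref and dni_valor and dni_valor != dni_ref: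
--             continue
--         if normalize_patient_name(nombre_valor) == nombre_ref:
--             return True
--     return False
-- ===== SOURCE B (Python) =====
-- def split_patient_visual_id(paciente_sel):
--     texto = str(paciente_sel or "").strip()
--     if " - " not in texto:
--         return texto, ""
--     nombre, dni = texto.rsplit(" - ", 1)
--     return nombre.strip(), dni.strip()
--
--
-- def normalize_patient_name(nombre):
--     return " ".join(str(nombre or "").strip().lower().split())
--
--
-- def record_matches_patient(record, paciente_sel, ctx):
--     if not isinstance(record, dict):
--         return False
--     dni_ref = str(ctx.get("dni") or "").strip()
--     nombre_ref = normalize_patient_name(ctx.get("nombre"))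
--
--     def matches(valor):
--         if paciente_sel and valor == paciente_sel:
--             return True
--         nombre_valor, dni_valor = split_patient_visual_id(valor)
--         if dni_ref and ((dni_valor and dni_valor == dni_ref) or valor == dni_ref):
--             return True
--         if nombre_ref and not (dni_ref and dni_valor and dni_valor != dni_ref):
--             return normalize_patient_name(nombre_valor) == nombre_ref
--         return False
--
--     return any(matches(str(record[clave]).strip())
--                for clave in ("paciente", "paciente_id", "dni")
--                if record.get(clave) not in (None, ""))
-- ===== Notes on version B (the rewrite author's own statement) =====
-- stated objective: simpler
-- what changed: Replaced A's three sequential scans over candidatos (exact-id scan, then DNI scan, then dni-filtered normalized-name scan) with a single any() pass using one per-candidate predicate that merges the three guarded tests.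
import Mathlib
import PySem

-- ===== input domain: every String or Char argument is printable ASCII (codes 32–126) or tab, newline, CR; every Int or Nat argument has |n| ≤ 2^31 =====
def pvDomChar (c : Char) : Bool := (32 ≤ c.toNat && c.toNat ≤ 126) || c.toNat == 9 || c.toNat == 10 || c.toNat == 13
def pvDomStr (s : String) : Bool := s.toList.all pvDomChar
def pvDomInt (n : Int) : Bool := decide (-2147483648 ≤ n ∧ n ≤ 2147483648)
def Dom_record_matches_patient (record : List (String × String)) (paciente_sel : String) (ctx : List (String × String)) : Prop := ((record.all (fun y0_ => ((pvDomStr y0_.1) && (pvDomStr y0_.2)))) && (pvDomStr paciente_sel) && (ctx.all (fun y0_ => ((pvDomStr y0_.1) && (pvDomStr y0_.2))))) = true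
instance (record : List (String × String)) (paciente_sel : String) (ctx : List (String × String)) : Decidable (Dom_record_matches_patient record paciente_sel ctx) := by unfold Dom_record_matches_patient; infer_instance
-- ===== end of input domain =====

-- ===== PORT A =====
-- B is a single pass over the same candidate list with one predicate instead of A's
-- three sequential scans (objective: simpler decomposition; same asymptotic cost).
-- Shared helper ports (both Pythons define/keep these two helpers verbatim).

-- split_patient_visual_id: texto.rsplit(" - ", 1) splits at the LAST occurrence of
-- " - "; ported by hand (PySem has no rsplit): the largest index j such that " - "
-- is a prefix of texto.drop j — exact Python rfind/rsplit semantics.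
def split_patient_visual_id (paciente_sel : List Char) : List Char × List Char :=
  let texto := PySem.Chars.strip paciente_sel
  let sep : List Char := [' ', '-', ' ']
  if PySem.Chars.isIn sep texto then
    let j := (((List.range (texto.length + 1)).filter
                (fun k => sep.isPrefixOf (texto.drop k))).foldr max 0)
    (PySem.Chars.strip (texto.take j), PySem.Chars.strip (texto.drop (j + 3)))
  else
    (texto, [])

def normalize_patient_name (nombre : List Char) : List Char :=
  PySem.Chars.join [' '] (PySem.Chars.split₀ (PySem.Chars.lower (PySem.Chars.strip nombre)))

-- candidatos: the same loop in both Pythons (B keeps it)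
def candidatos (record : List (String × String)) : List (List Char) :=
  (["paciente", "paciente_id", "dni"] : List String).foldl
    (fun acc clave =>
      match PySem.Dict.get? (PySem.Dict.mk record) clave with
      | none => acc
      | some v => if v == "" then acc else acc ++ [PySem.Chars.strip v.toList])
    []

def record_matches_patient (record : List (String × String)) (paciente_sel : String) (ctx : List (String × String)) : Bool :=
  let cand := candidatos record
  if (paciente_sel != "") && cand.any (fun valor => valor == paciente_sel.toList) then
    true
  else
    let dni_ref := PySem.Chars.strip (PySem.Dict.getD (PySem.Dict.mk ctx) "dni" "").toList
    if (!dni_ref.isEmpty) && cand.any (fun valor =>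
         let dni_valor := (split_patient_visual_id valor).2
         ((!dni_valor.isEmpty) && dni_valor == dni_ref) || valor == dni_ref) then
      true
    else
      let nombre_ref := normalize_patient_name (PySem.Dict.getD (PySem.Dict.mk ctx) "nombre" "").toList
      if nombre_ref.isEmpty then
        false
      else
        cand.any (fun valor =>
          let p := split_patient_visual_id valor
          if (!dni_ref.isEmpty) && (!p.2.isEmpty) && (p.2 != dni_ref) then
            false
          else
            normalize_patient_name p.1 == nombre_ref)

-- ===== PORT B =====
def record_matches_patient_alt (record : List (String × String)) (paciente_sel : String) (ctx : List (String × String)) : Bool :=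
  let dni_ref := PySem.Chars.strip (PySem.Dict.getD (PySem.Dict.mk ctx) "dni" "").toList
  let nombre_ref := normalize_patient_name (PySem.Dict.getD (PySem.Dict.mk ctx) "nombre" "").toList
  (candidatos record).any (fun valor =>
    if (paciente_sel != "") && valor == paciente_sel.toList then
      true
    else
      let p := split_patient_visual_id valor
      if (!dni_ref.isEmpty) && (((!p.2.isEmpty) && p.2 == dni_ref) || valor == dni_ref) then
        true
      else if (!nombre_ref.isEmpty) && !((!dni_ref.isEmpty) && (!p.2.isEmpty) && (p.2 != dni_ref)) then
        normalize_patient_name p.1 == nombre_ref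
      else
        false)

-- ===== PRECONDITION & SPEC =====
def Spec_record_matches_patient (record : List (String × String)) (paciente_sel : String) (ctx : List (String × String)) (out : Bool) : Prop := out = record_matches_patient_alt record paciente_sel ctx
instance (record : List (String × String)) (paciente_sel : String) (ctx : List (String × String)) (out : Bool) : Decidable (Spec_record_matches_patient record paciente_sel ctx out) := by unfold Spec_record_matches_patient; infer_instance

-- ===== CLAIM (what is proved, stated in full; the proofs are below) =====
def Claim_equal_record_matches_patient : Prop := ∀ (record : List (String × String)) (paciente_sel : String) (ctx : List (String × String)), Dom_record_matches_patient record paciente_sel ctx → Spec_record_matches_patient record paciente_sel ctx (record_matches_patient record paciente_sel ctx)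

-- ===== LEMMAS AND PROOFS =====

-- A's three guarded sequential scans over one list equal one scan with the merged predicate
lemma scan_merge {α : Type} (l : List α) (P Q N : Bool) (f g h : α → Bool) :
    (if P && l.any f then true
     else if Q && l.any g then true
     else if N then false else l.any h)
    = l.any (fun v => (P && f v) || (Q && g v) || (!N && h v)) := by
  cases P <;> cases Q <;> cases N <;>
    simp [Bool.or_assoc, List.any_eq, and_or_left, exists_or]

-- ===== VERDICT (by name: the statement is the Claim_ definition above) =====
theorem record_matches_patient_spec : Claim_equal_record_matches_patient := by
  intro record paciente_sel ctx _
  unfold Spec_record_matches_patient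
  simp only [record_matches_patient, record_matches_patient_alt]
  set cand := candidatos record with hc
  set dni_ref := PySem.Chars.strip (PySem.Dict.getD (PySem.Dict.mk ctx) "dni" "").toList with hdr
  set nombre_ref := normalize_patient_name (PySem.Dict.getD (PySem.Dict.mk ctx) "nombre" "").toList with hnr
  rw [scan_merge]
  refine List.any_congr rfl ?_
  intro valor
  set p := split_patient_visual_id valor with hpv
  cases hp : (paciente_sel != "") <;> cases hv : (valor == paciente_sel.toList) <;>
    cases hd : dni_ref.isEmpty <;> cases hn : nombre_ref.isEmpty <;>
      cases h2 : p.2.isEmpty <;>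
        simp [Bool.beq_eq_decide_eq]
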